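-- pv_equiv track=rewrite | github.com/jeffuofa93/algo_prep | algoExpert/graphs/minimum_passes_matrix.py | minimumPassesOfMatrix
-- ===== SOURCE A (Python) =====
-- from collections import deque
--
-- def minimumPassesOfMatrix(matrix):
--     # Write your code here.
--     # first lets get the position of all the negative values in the map
--     # find all positive values and add it to q1
--     # take the q
--     q1 = deque()
--     q2 = deque()
--     neg_set = deque()
--     count = 0
--     for i in range(len(matrix)):
--         for j, val in enumerate(matrix[i]):
--             if val > 0:
--                 q1.append((i, j))
--             if val < 0:
--                 neg_set.append((i, j))
--     q1_turn = True
--     while True: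
--         cur_q = q1 if q1_turn else q2
--         next_q = q2 if q1_turn else q1
--         while cur_q:
--             i, j = cur_q.popleft()
--             find_more_nodes(i + 1, j, matrix, next_q, neg_set)
--             find_more_nodes(i - 1, j, matrix, next_q, neg_set)
--             find_more_nodes(i, j - 1, matrix, next_q, neg_set)
--             find_more_nodes(i, j + 1, matrix, next_q, neg_set)
--         count += 1
--         if not q1 and not q2:
--             return count - 1 if len(neg_set) == 0 else -1
--         q1_turn = not q1_turn
--
-- def find_more_nodes(i, j, matrix, next_q, neq_set):
--     if i < 0 or i >= len(matrix) or j < 0 or j >= len(matrix[i]):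
--         return
--     cur_node = matrix[i][j]
--     if cur_node < 0:
--         neq_set.remove((i, j))
--         next_q.append((i, j))
--         matrix[i][j] = cur_node * -1
-- ===== SOURCE B (Python) =====
-- def minimumPassesOfMatrix(matrix):
--     # Iterated full-grid relaxation (no queue/frontier): each pass scans the whole
--     # grid, collects every negative cell that has a positive 4-neighbor, then flips
--     # them all in place; repeat until a pass finds nothing. Mutates `matrix` in
--     # place with the same flips as the original.
--     passes = 0
--     while True:
--         flips = [(i, j)
--                  for i, row in enumerate(matrix)
--                  for j, val in enumerate(row)
--                  if val < 0 and any(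
--                      0 <= ni < len(matrix) and 0 <= nj < len(matrix[ni]) and matrix[ni][nj] > 0
--                      for ni, nj in ((i + 1, j), (i - 1, j), (i, j - 1), (i, j + 1)))]
--         if not flips:
--             break
--         for i, j in flips:
--             matrix[i][j] = -matrix[i][j]
--         passes += 1
--     return passes if all(val >= 0 for row in matrix for val in row) else -1
-- ===== Notes on version B (the rewrite author's own statement) =====
-- stated objective: faster
-- what changed: Replaces the BFS with two alternating frontier queues and a neg_set deque (a linear .remove per flipped cell) by queueless iterated full-grid relaxation: each pass rescans the whole grid, collects every negative cell with a positive 4-neighbor, flips them all at once, and repeats until a pass finds nothing.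
import Mathlib
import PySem

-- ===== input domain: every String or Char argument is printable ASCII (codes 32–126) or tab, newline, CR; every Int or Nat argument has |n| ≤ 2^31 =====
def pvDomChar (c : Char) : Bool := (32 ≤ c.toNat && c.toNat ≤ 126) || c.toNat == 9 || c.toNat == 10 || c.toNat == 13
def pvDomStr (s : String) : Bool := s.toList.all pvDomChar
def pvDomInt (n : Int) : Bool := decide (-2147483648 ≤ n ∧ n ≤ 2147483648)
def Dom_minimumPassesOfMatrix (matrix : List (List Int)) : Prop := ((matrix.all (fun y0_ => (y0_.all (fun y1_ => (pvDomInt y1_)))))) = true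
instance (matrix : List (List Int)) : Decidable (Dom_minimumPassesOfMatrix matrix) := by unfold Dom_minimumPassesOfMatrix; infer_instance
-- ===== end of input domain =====

-- B replaces A's BFS (two alternating frontier queues + a neg_set deque with linear
-- remove) by iterated full-grid relaxation sweeps: each pass rescans the whole grid,
-- collects every negative cell with a positive 4-neighbor, flips them all, and repeats
-- until a pass finds nothing.  Both Pythons mutate `matrix` in place identically; the
-- theorem is about the return value.

-- ===== PORT A =====
-- find_more_nodes: early-return on out-of-range, flip a negative cell, move it to next_q,
-- remove it from neg_set.  State threaded functionally as (matrix, next_q, neg_set).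
def findMoreNodes (i j : Int) (matrix : List (List Int)) (next_q neg_set : List (Int × Int)) :
    List (List Int) × List (Int × Int) × List (Int × Int) :=
  if i < 0 ∨ (matrix.length : Int) ≤ i ∨ j < 0 ∨ (((PySem.List.pyGet? matrix i).getD []).length : Int) ≤ j then
    (matrix, next_q, neg_set)
  else
    let row := (PySem.List.pyGet? matrix i).getD []        -- i in range ⇒ pyGet? = some row
    let cur_node := (PySem.List.pyGet? row j).getD 0       -- j in range ⇒ some value
    if cur_node < 0 then
      (matrix.set i.toNat (row.set j.toNat (cur_node * -1)),
       next_q ++ [(i, j)],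
       -- deque.remove: always succeeds here — a negative cell is always in neg_set
       (PySem.List.remove? neg_set (i, j)).getD neg_set)
    else (matrix, next_q, neg_set)

-- `while cur_q: i, j = cur_q.popleft(); find_more_nodes ×4`
def drainA : List (Int × Int) → List (List Int) → List (Int × Int) → List (Int × Int) →
    List (List Int) × List (Int × Int) × List (Int × Int)
  | [], m, nq, ns => (m, nq, ns)
  | (i, j) :: rest, m, nq, ns =>
    let s1 := findMoreNodes (i + 1) j m nq ns
    let s2 := findMoreNodes (i - 1) j s1.1 s1.2.1 s1.2.2
    let s3 := findMoreNodes i (j - 1) s2.1 s2.2.1 s2.2.2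
    let s4 := findMoreNodes i (j + 1) s3.1 s3.2.1 s3.2.2
    drainA rest s4.1 s4.2.1 s4.2.2

-- the initial double scan: `for i in range(len(matrix)): for j, val in enumerate(matrix[i])`
def scanRowA (i j : Int) : List Int → List (Int × Int) × List (Int × Int)
  | [] => ([], [])
  | v :: rest =>
    let s := scanRowA i (j + 1) rest
    (if v > 0 then (i, j) :: s.1 else s.1, if v < 0 then (i, j) :: s.2 else s.2)

def scanA (i : Int) : List (List Int) → List (Int × Int) × List (Int × Int)
  | [] => ([], [])
  | row :: rest =>
    let s1 := scanRowA i 0 row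
    let s2 := scanA (i + 1) rest
    (s1.1 ++ s2.1, s1.2 ++ s2.2)

-- `while True` with q1/q2/q1_turn; fuel exceeds the iteration count (≤ |neg_set| + 1),
-- so the 0 branch is unreachable.
def loopA : Nat → List (Int × Int) → List (Int × Int) → Bool → List (List Int) →
    List (Int × Int) → Int → Int
  | 0, _, _, _, _, _, _ => -2
  | fuel + 1, q1, q2, q1_turn, matrix, neg_set, count =>
    let cur_q := if q1_turn then q1 else q2
    let s := drainA cur_q matrix (if q1_turn then q2 else q1) neg_set
    let q1' := if q1_turn then ([] : List (Int × Int)) else s.2.1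
    let q2' := if q1_turn then s.2.1 else []
    let count' := count + 1
    if q1' = [] ∧ q2' = [] then (if s.2.2.length = 0 then count' - 1 else -1)
    else loopA fuel q1' q2' (!q1_turn) s.1 s.2.2 count'

def minimumPassesOfMatrix (matrix : List (List Int)) : Int :=
  let s := scanA 0 matrix
  loopA (matrix.flatten.length + 1) s.1 [] true matrix s.2 0

-- ===== PORT B =====
-- `0 <= ni < len(matrix) and 0 <= nj < len(matrix[ni]) and matrix[ni][nj] > 0` for one neighbor
def cellPos (matrix : List (List Int)) (p : Int × Int) : Bool :=
  decide (0 ≤ p.1) && decide (p.1 < (matrix.length : Int)) && decide (0 ≤ p.2) &&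
  decide (p.2 < ((((PySem.List.pyGet? matrix p.1).getD []).length) : Int)) &&
  decide (0 < (PySem.List.pyGet? ((PySem.List.pyGet? matrix p.1).getD []) p.2).getD 0)

-- `any(... for ni, nj in ((i+1,j),(i-1,j),(i,j-1),(i,j+1)))`
def hasPosNbr (matrix : List (List Int)) (i j : Int) : Bool :=
  [(i + 1, j), (i - 1, j), (i, j - 1), (i, j + 1)].any (cellPos matrix)

-- inner comprehension over one row (j the running enumerate index)
def flipsRow (matrix : List (List Int)) (i : Int) : Int → List Int → List (Int × Int)
  | _, [] => []
  | j, v :: rest =>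
    (if v < 0 && hasPosNbr matrix i j then [(i, j)] else []) ++ flipsRow matrix i (j + 1) rest

-- outer comprehension over the rows (i the running enumerate index)
def flipsAll (matrix : List (List Int)) : Int → List (List Int) → List (Int × Int)
  | _, [] => []
  | i, row :: rest => flipsRow matrix i 0 row ++ flipsAll matrix (i + 1) rest

-- `flips = [(i, j) for i, row in enumerate(matrix) for j, val in enumerate(row) if ...]`
def sweepFlips (matrix : List (List Int)) : List (Int × Int) :=
  flipsAll matrix 0 matrix

-- `matrix[i][j] = -matrix[i][j]`
def flipCell (m : List (List Int)) (i j : Int) : List (List Int) :=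
  let row := (PySem.List.pyGet? m i).getD []
  m.set i.toNat (row.set j.toNat (-((PySem.List.pyGet? row j).getD 0)))

-- `all(val >= 0 for row in matrix for val in row)` negated
def anyNeg (m : List (List Int)) : Bool :=
  m.any (fun row => row.any (fun v => decide (v < 0)))

-- `while True:` sweep loop; fuel exceeds #productive sweeps + 1, the 0 branch is unreachable
def loopB : Nat → List (List Int) → Int → Int
  | 0, _, _ => -2
  | fuel + 1, m, passes =>
    let fl := sweepFlips m
    if fl = [] then (if anyNeg m then -1 else passes)
    else loopB fuel (fl.foldl (fun acc p => flipCell acc p.1 p.2) m) (passes + 1)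

def minimumPassesOfMatrix_alt (matrix : List (List Int)) : Int :=
  loopB (matrix.flatten.length + 2) matrix 0

-- ===== PRECONDITION & SPEC =====
def Spec_minimumPassesOfMatrix (matrix : List (List Int)) (out : Int) : Prop := out = minimumPassesOfMatrix_alt matrix
instance (matrix : List (List Int)) (out : Int) : Decidable (Spec_minimumPassesOfMatrix matrix out) := by unfold Spec_minimumPassesOfMatrix; infer_instance

-- ===== CLAIM (what is proved, stated in full; the proofs are below) =====
def Claim_equal_minimumPassesOfMatrix : Prop := ∀ (matrix : List (List Int)), Dom_minimumPassesOfMatrix matrix → Spec_minimumPassesOfMatrix matrix (minimumPassesOfMatrix matrix)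

-- ===== LEMMAS AND PROOFS =====

-- value of cell (i, j), 0 outside the grid (sign is all that matters off-grid)
def getC (m : List (List Int)) (i j : Int) : Int :=
  if 0 ≤ i ∧ 0 ≤ j then ((m[i.toNat]?.getD [])[j.toNat]?).getD 0 else 0

def posAt (m : List (List Int)) (c : Int × Int) : Prop := 0 < getC m c.1 c.2
def negAt (m : List (List Int)) (c : Int × Int) : Prop := getC m c.1 c.2 < 0

def nbrs (c : Int × Int) : List (Int × Int) :=
  [(c.1 + 1, c.2), (c.1 - 1, c.2), (c.1, c.2 - 1), (c.1, c.2 + 1)]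

-- the cells flipped by one level/sweep: negatives with a positive neighbor
def Sset (m : List (List Int)) (c : Int × Int) : Prop :=
  negAt m c ∧ ∃ n ∈ nbrs c, posAt m n

def SameShape (m m' : List (List Int)) : Prop :=
  m.length = m'.length ∧ ∀ k : Nat, (m[k]?.getD []).length = (m'[k]?.getD []).length

-- m' is m with exactly the P-cells sign-flipped
def Flips (m : List (List Int)) (P : Int × Int → Prop) (m' : List (List Int)) : Prop :=
  SameShape m m' ∧ ∀ c : Int × Int,
    (P c → getC m' c.1 c.2 = -getC m c.1 c.2) ∧ (¬ P c → getC m' c.1 c.2 = getC m c.1 c.2)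

-- invariants carried by A's (next_q, neg_set) state
def InvAB (m : List (List Int)) (nq ns : List (Int × Int)) : Prop :=
  (∀ c ∈ nq, posAt m c) ∧ nq.Nodup ∧
  (∀ c, negAt m c → c ∈ ns) ∧ (∀ c ∈ ns, negAt m c) ∧ ns.Nodup

-- every positive cell with a negative neighbor is in the frontier
def Front (m : List (List Int)) (q : List (Int × Int)) : Prop :=
  ∀ p, posAt m p → (∃ d ∈ nbrs p, negAt m d) → p ∈ q

def fmnFold (l : List (Int × Int)) (st : List (List Int) × List (Int × Int) × List (Int × Int)) :
    List (List Int) × List (Int × Int) × List (Int × Int) :=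
  l.foldl (fun s c => findMoreNodes c.1 c.2 s.1 s.2.1 s.2.2) st

theorem adj_symm (p c : Int × Int) : c ∈ nbrs p ↔ p ∈ nbrs c := by
  obtain ⟨a, b⟩ := p; obtain ⟨x, y⟩ := c
  simp only [nbrs, List.mem_cons, List.not_mem_nil, or_false, Prod.mk.injEq]
  constructor <;> rintro (⟨h1, h2⟩ | ⟨h1, h2⟩ | ⟨h1, h2⟩ | ⟨h1, h2⟩) <;> omega

theorem nbrs_nodup (p : Int × Int) : (nbrs p).Nodup := by
  obtain ⟨a, b⟩ := p
  simp [nbrs, List.nodup_cons, Prod.ext_iff]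
  omega

theorem getC_neg_bounds (m : List (List Int)) (i j : Int) (h : getC m i j ≠ 0) :
    0 ≤ i ∧ i.toNat < m.length ∧ 0 ≤ j ∧ j.toNat < (m[i.toNat]?.getD []).length := by
  by_cases h0 : 0 ≤ i ∧ 0 ≤ j
  · simp only [getC, if_pos h0] at h
    by_cases hi : i.toNat < m.length
    · by_cases hj : j.toNat < (m[i.toNat]?.getD []).length
      · exact ⟨h0.1, hi, h0.2, hj⟩
      · have hn : (m[i.toNat]?.getD [])[j.toNat]? = none := List.getElem?_eq_none (by omega)
        rw [hn] at h; simp at h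
    · have hn : m[i.toNat]? = none := List.getElem?_eq_none (by omega)
      rw [hn] at h; simp at h
  · simp only [getC, if_neg h0] at h; omega

theorem getC_of_lt (m : List (List Int)) (a b : Nat) (ha : a < m.length)
    (hb : b < (m[a]?.getD []).length) :
    getC m (a : Int) (b : Int) = (m[a]?.getD [])[b]?.getD 0 := by
  simp [getC]

theorem set_getC (m : List (List Int)) (i j w : Int)
    (hi0 : 0 ≤ i) (hj0 : 0 ≤ j) (hi : i.toNat < m.length)
    (hj : j.toNat < (m[i.toNat]?.getD []).length) (a b : Int) :
    getC (m.set i.toNat ((m[i.toNat]?.getD []).set j.toNat w)) a b =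
      if a = i ∧ b = j then w else getC m a b := by
  by_cases h0 : 0 ≤ a ∧ 0 ≤ b
  · by_cases hab : a = i ∧ b = j
    · obtain ⟨rfl, rfl⟩ := hab
      simp only [getC, if_pos h0, if_pos (⟨rfl, rfl⟩ : a = a ∧ b = b)]
      rw [List.getElem?_set_self (by simpa using hi)]
      simp only [Option.getD_some]
      rw [List.getElem?_set_self (by simpa using hj)]
      rfl
    · rw [if_neg hab]
      simp only [getC, if_pos h0]
      by_cases ha : a.toNat = i.toNat
      · have hbj : b.toNat ≠ j.toNat := by
          intro hc; exact hab ⟨by omega, by omega⟩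
        rw [ha, List.getElem?_set_self (by simpa using hi)]
        simp only [Option.getD_some]
        rw [List.getElem?_set_ne (by omega)]
      · rw [List.getElem?_set_ne (by omega)]
  · rw [if_neg (by rintro ⟨rfl, rfl⟩; exact h0 ⟨hi0, hj0⟩)]
    simp [getC, h0]

theorem set_shape (m : List (List Int)) (i j : Nat) (w : Int) (hi : i < m.length) :
    SameShape m (m.set i ((m[i]?.getD []).set j w)) := by
  refine ⟨by simp, ?_⟩
  intro k
  by_cases hk : k = i
  · subst hk
    rw [List.getElem?_set_self (by simpa using hi)]
    simp
  · rw [List.getElem?_set_ne (by omega)]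

theorem SameShape_trans {m1 m2 m3 : List (List Int)} (h1 : SameShape m1 m2)
    (h2 : SameShape m2 m3) : SameShape m1 m3 := by
  exact ⟨h1.1.trans h2.1, fun k => (h1.2 k).trans (h2.2 k)⟩

theorem Flips_congr {m m' : List (List Int)} {P Q : Int × Int → Prop}
    (h : Flips m P m') (hiff : ∀ c, P c ↔ Q c) : Flips m Q m' := by
  refine ⟨h.1, fun c => ⟨fun hq => (h.2 c).1 ((hiff c).mpr hq), fun hq => (h.2 c).2 (fun hp => hq ((hiff c).mp hp))⟩⟩

theorem Flips_trans {m m1 m2 : List (List Int)} {P Q : Int × Int → Prop}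
    (h1 : Flips m P m1) (h2 : Flips m1 Q m2) (hdisj : ∀ c, ¬(P c ∧ Q c)) :
    Flips m (fun c => P c ∨ Q c) m2 := by
  refine ⟨SameShape_trans h1.1 h2.1, fun c => ⟨?_, ?_⟩⟩
  · rintro (hp | hq)
    · rw [(h2.2 c).2 (fun hq => hdisj c ⟨hp, hq⟩), (h1.2 c).1 hp]
    · rw [(h2.2 c).1 hq, (h1.2 c).2 (fun hp => hdisj c ⟨hp, hq⟩)]
  · intro hn
    push_neg at hn
    rw [(h2.2 c).2 hn.2, (h1.2 c).2 hn.1]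

theorem matEq (m1 m2 : List (List Int)) (hs : SameShape m1 m2)
    (hg : ∀ a b : Nat, getC m1 a b = getC m2 a b) : m1 = m2 := by
  apply List.ext_getElem hs.1
  intro a ha1 ha2
  have hlen : m1[a].length = m2[a].length := by
    have := hs.2 a
    rwa [List.getElem?_eq_getElem ha1, List.getElem?_eq_getElem ha2] at this
  apply List.ext_getElem hlen
  intro b hb1 hb2
  have := hg a b
  have h0 : (0 : Int) ≤ (a : Int) ∧ (0 : Int) ≤ (b : Int) :=
    ⟨Int.natCast_nonneg a, Int.natCast_nonneg b⟩
  simp only [getC, Int.toNat_natCast, if_pos h0] at this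
  rwa [List.getElem?_eq_getElem ha1, List.getElem?_eq_getElem ha2, Option.getD_some,
    Option.getD_some, List.getElem?_eq_getElem hb1, List.getElem?_eq_getElem hb2,
    Option.getD_some, Option.getD_some] at this

theorem SameShape_symm {m1 m2 : List (List Int)} (h : SameShape m1 m2) : SameShape m2 m1 := by
  unfold SameShape at h ⊢
  exact ⟨h.1.symm, fun k => (h.2 k).symm⟩

theorem flips_unique {m m1 m2 : List (List Int)} {P : Int × Int → Prop}
    (h1 : Flips m P m1) (h2 : Flips m P m2) : m1 = m2 := by
  refine matEq m1 m2 (SameShape_trans (SameShape_symm h1.1) h2.1) ?_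
  intro a b
  by_cases hp : P ((a : Int), (b : Int))
  · rw [(h1.2 _).1 hp, (h2.2 _).1 hp]
  · rw [(h1.2 _).2 hp, (h2.2 _).2 hp]

theorem Flips_id (m : List (List Int)) (P : Int × Int → Prop) (hP : ∀ c, ¬ P c) :
    Flips m P m := by
  unfold Flips SameShape
  exact ⟨⟨rfl, fun _ => rfl⟩, fun c => ⟨fun hc => absurd hc (hP c), fun _ => rfl⟩⟩

theorem fmn_nonneg (i j : Int) (m : List (List Int)) (nq ns : List (Int × Int))
    (h : ¬ getC m i j < 0) : findMoreNodes i j m nq ns = (m, nq, ns) := by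
  simp only [findMoreNodes]
  by_cases hg : i < 0 ∨ (m.length : Int) ≤ i ∨ j < 0 ∨
      ((((PySem.List.pyGet? m i).getD []).length : Int)) ≤ j
  · rw [if_pos hg]
  · have h0 : (0 : Int) ≤ i := by omega
    have h2 : (0 : Int) ≤ j := by omega
    rw [PySem.List.pyGet?_of_nonneg _ h0] at hg ⊢
    rw [PySem.List.pyGet?_of_nonneg _ h2]
    rw [if_neg hg, if_neg]
    intro hc
    apply h
    simpa only [getC, if_pos (⟨h0, h2⟩ : (0:Int) ≤ i ∧ (0:Int) ≤ j)] using hc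

theorem fmn_neg (i j : Int) (m : List (List Int)) (nq ns : List (Int × Int))
    (h : getC m i j < 0) (hmem : (i, j) ∈ ns) :
    findMoreNodes i j m nq ns =
      (m.set i.toNat ((m[i.toNat]?.getD []).set j.toNat (getC m i j * -1)),
       nq ++ [(i, j)], ns.erase (i, j)) := by
  obtain ⟨h0, h1, h2, h3⟩ := getC_neg_bounds m i j (by omega)
  simp only [findMoreNodes]
  rw [PySem.List.pyGet?_of_nonneg _ h0, PySem.List.pyGet?_of_nonneg _ h2]
  have hcur : ((m[i.toNat]?.getD [])[j.toNat]?).getD 0 = getC m i j := by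
    simp [getC, h0, h2]
  rw [if_neg (by omega), hcur, if_pos h, PySem.List.remove?_eq_some_erase ns (i, j) hmem]
  rfl

theorem fmnFold_char (l : List (Int × Int)) : ∀ (m : List (List Int)) (nq ns : List (Int × Int)),
    l.Nodup → InvAB m nq ns →
    Flips m (fun c => negAt m c ∧ c ∈ l) (fmnFold l (m, nq, ns)).1
    ∧ (∀ c, c ∈ (fmnFold l (m, nq, ns)).2.1 ↔ c ∈ nq ∨ (negAt m c ∧ c ∈ l))
    ∧ (∀ c, c ∈ (fmnFold l (m, nq, ns)).2.2 ↔ c ∈ ns ∧ ¬(negAt m c ∧ c ∈ l))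
    ∧ InvAB (fmnFold l (m, nq, ns)).1 (fmnFold l (m, nq, ns)).2.1 (fmnFold l (m, nq, ns)).2.2 := by
  induction l with
  | nil =>
    intro m nq ns _ hInv
    refine ⟨Flips_id m _ (by simp), by simp [fmnFold], by simp [fmnFold], hInv⟩
  | cons c0 l ih =>
    rintro m nq ns hnd hInv
    obtain ⟨i, j⟩ := c0
    have hl0 : (i, j) ∉ l := (List.nodup_cons.mp hnd).1
    have hlnd : l.Nodup := (List.nodup_cons.mp hnd).2
    obtain ⟨hqp, hqnd, hni, hnss, hnsnd⟩ := hInv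
    by_cases hc0 : getC m i j < 0
    · have hmem : (i, j) ∈ ns := hni (i, j) hc0
      obtain ⟨b0, b1, b2, b3⟩ := getC_neg_bounds m i j (by omega)
      have hstep : fmnFold ((i, j) :: l) (m, nq, ns)
          = fmnFold l (m.set i.toNat ((m[i.toNat]?.getD []).set j.toNat (getC m i j * -1)),
              nq ++ [(i, j)], ns.erase (i, j)) := by
        show fmnFold l (findMoreNodes i j m nq ns) = _
        rw [fmn_neg i j m nq ns hc0 hmem]
      set m1 := m.set i.toNat ((m[i.toNat]?.getD []).set j.toNat (getC m i j * -1)) with hm1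
      have hg1 : ∀ a b : Int, getC m1 a b
          = if a = i ∧ b = j then getC m i j * -1 else getC m a b :=
        fun a b => set_getC m i j _ b0 b2 b1 b3 a b
      have hflip1 : Flips m (fun c => c = (i, j)) m1 := by
        refine ⟨set_shape m i.toNat j.toNat _ b1, fun c => ⟨?_, ?_⟩⟩
        · rintro rfl
          rw [hg1, if_pos ⟨rfl, rfl⟩]; ring
        · intro hne
          rw [hg1, if_neg]
          rintro ⟨e1, e2⟩
          exact hne (by obtain ⟨x, y⟩ := c; simp_all)
      have hsame1 : ∀ c : Int × Int, c ≠ (i, j) → getC m1 c.1 c.2 = getC m c.1 c.2 :=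
        fun c hne => (hflip1.2 c).2 hne
      have hposij : 0 < getC m1 i j := by
        rw [hg1, if_pos ⟨rfl, rfl⟩]; omega
      have hInv1 : InvAB m1 (nq ++ [(i, j)]) (ns.erase (i, j)) := by
        refine ⟨?_, ?_, ?_, ?_, hnsnd.erase _⟩
        · intro c hc
          rcases List.mem_append.mp hc with hc | hc
          · have hp := hqp c hc
            have hne : c ≠ (i, j) := by
              rintro rfl; simp [posAt] at hp; omega
            simp only [posAt] at hp ⊢
            rw [hsame1 c hne]; exact hp
          · have : c = (i, j) := by simpa using hc
            subst this; exact hposij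
        · rw [List.nodup_append]
          refine ⟨hqnd, List.nodup_singleton _, ?_⟩
          intro a ha b hb
          have hb' : b = (i, j) := by simpa using hb
          subst hb'
          rintro rfl
          have := hqp _ ha
          simp [posAt] at this; omega
        · intro c hc
          have hne : c ≠ (i, j) := by
            rintro rfl; simp [negAt] at hc; omega
          have : getC m c.1 c.2 < 0 := by
            simp only [negAt] at hc; rwa [hsame1 c hne] at hc
          exact (List.Nodup.mem_erase_iff hnsnd).mpr ⟨hne, hni c this⟩
        · intro c hc
          obtain ⟨hne, hcns⟩ := (List.Nodup.mem_erase_iff hnsnd).mp hc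
          have := hnss c hcns
          simp only [negAt] at this ⊢
          rwa [hsame1 c hne]
      obtain ⟨rF, rQ, rN, rI⟩ := ih m1 (nq ++ [(i, j)]) (ns.erase (i, j)) hlnd hInv1
      rw [hstep]
      have hnegAt1 : ∀ c : Int × Int, c ≠ (i, j) → (negAt m1 c ↔ negAt m c) := by
        intro c hne; simp only [negAt]; rw [hsame1 c hne]
      have hnij : ¬ negAt m1 (i, j) := by simp [negAt]; omega
      refine ⟨?_, ?_, ?_, rI⟩
      · refine Flips_congr (Flips_trans hflip1 rF ?_) ?_
        · rintro c ⟨rfl, hq, _⟩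
          exact hnij hq
        · intro c
          constructor
          · rintro (rfl | ⟨hq, hcl⟩)
            · exact ⟨hc0, List.mem_cons_self ..⟩
            · have hne : c ≠ (i, j) := by rintro rfl; exact hnij hq
              exact ⟨(hnegAt1 c hne).mp hq, List.mem_cons_of_mem _ hcl⟩
          · rintro ⟨hneg, hmem'⟩
            rcases List.mem_cons.mp hmem' with rfl | hcl
            · exact Or.inl rfl
            · have hne : c ≠ (i, j) := by rintro rfl; exact hl0 hcl
              exact Or.inr ⟨(hnegAt1 c hne).mpr hneg, hcl⟩
      · intro c
        rw [rQ c]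
        simp only [List.mem_append, List.mem_cons, List.not_mem_nil, or_false]
        constructor
        · rintro ((hc | rfl) | ⟨hq, hcl⟩)
          · exact Or.inl hc
          · exact Or.inr ⟨hc0, Or.inl rfl⟩
          · have hne : c ≠ (i, j) := by rintro rfl; exact hnij hq
            exact Or.inr ⟨(hnegAt1 c hne).mp hq, Or.inr hcl⟩
        · rintro (hc | ⟨hneg, rfl | hcl⟩)
          · exact Or.inl (Or.inl hc)
          · exact Or.inl (Or.inr rfl)
          · have hne : c ≠ (i, j) := by rintro rfl; exact hl0 hcl
            exact Or.inr ⟨(hnegAt1 c hne).mpr hneg, hcl⟩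
      · intro c
        rw [rN c, List.Nodup.mem_erase_iff hnsnd]
        constructor
        · rintro ⟨⟨hne, hcns⟩, hnot⟩
          refine ⟨hcns, ?_⟩
          rintro ⟨hneg, hmem'⟩
          rcases List.mem_cons.mp hmem' with rfl | hcl
          · exact hne rfl
          · exact hnot ⟨(hnegAt1 c hne).mpr hneg, hcl⟩
        · rintro ⟨hcns, hnot⟩
          have hne : c ≠ (i, j) := by
            rintro rfl; exact hnot ⟨hc0, List.mem_cons_self ..⟩
          refine ⟨⟨hne, hcns⟩, ?_⟩
          rintro ⟨hq, hcl⟩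
          exact hnot ⟨(hnegAt1 c hne).mp hq, List.mem_cons_of_mem _ hcl⟩
    · have hstep : fmnFold ((i, j) :: l) (m, nq, ns) = fmnFold l (m, nq, ns) := by
        show fmnFold l (findMoreNodes i j m nq ns) = _
        rw [fmn_nonneg i j m nq ns hc0]
      obtain ⟨rF, rQ, rN, rI⟩ := ih m nq ns hlnd ⟨hqp, hqnd, hni, hnss, hnsnd⟩
      rw [hstep]
      have hiff : ∀ c : Int × Int, (negAt m c ∧ c ∈ l) ↔ (negAt m c ∧ c ∈ (i, j) :: l) := by
        intro c
        constructor
        · rintro ⟨hneg, hcl⟩; exact ⟨hneg, List.mem_cons_of_mem _ hcl⟩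
        · rintro ⟨hneg, hmem'⟩
          rcases List.mem_cons.mp hmem' with rfl | hcl
          · exact absurd hneg hc0
          · exact ⟨hneg, hcl⟩
      refine ⟨Flips_congr rF hiff, ?_, ?_, rI⟩
      · intro c; rw [rQ c]
        constructor
        · rintro (hc | hd)
          · exact Or.inl hc
          · exact Or.inr ((hiff c).mp hd)
        · rintro (hc | hd)
          · exact Or.inl hc
          · exact Or.inr ((hiff c).mpr hd)
      · intro c; rw [rN c]
        constructor
        · rintro ⟨hc, hnot⟩; exact ⟨hc, fun hd => hnot ((hiff c).mpr hd)⟩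
        · rintro ⟨hc, hnot⟩; exact ⟨hc, fun hd => hnot ((hiff c).mp hd)⟩

theorem drain_char (q : List (Int × Int)) : ∀ (m : List (List Int)) (nq ns : List (Int × Int)),
    (∀ c ∈ q, posAt m c) → InvAB m nq ns →
    Flips m (fun c => negAt m c ∧ ∃ p ∈ q, c ∈ nbrs p) (drainA q m nq ns).1
    ∧ (∀ c, c ∈ (drainA q m nq ns).2.1 ↔ c ∈ nq ∨ (negAt m c ∧ ∃ p ∈ q, c ∈ nbrs p))
    ∧ (∀ c, c ∈ (drainA q m nq ns).2.2 ↔ c ∈ ns ∧ ¬(negAt m c ∧ ∃ p ∈ q, c ∈ nbrs p))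
    ∧ InvAB (drainA q m nq ns).1 (drainA q m nq ns).2.1 (drainA q m nq ns).2.2 := by
  induction q with
  | nil =>
    intro m nq ns _ hInv
    refine ⟨Flips_id m _ (by simp), by simp [drainA], by simp [drainA], hInv⟩
  | cons p0 rest ih =>
    rintro m nq ns hq hInv
    obtain ⟨i, j⟩ := p0
    have hp0 : posAt m (i, j) := hq _ (List.mem_cons_self ..)
    have hqrest : ∀ c ∈ rest, posAt m c := fun c hc => hq c (List.mem_cons_of_mem _ hc)
    obtain ⟨F1, Q1, N1, I1⟩ := fmnFold_char (nbrs (i, j)) m nq ns (nbrs_nodup _) hInv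
    set st1 := fmnFold (nbrs (i, j)) (m, nq, ns) with hst1
    have hstep : drainA ((i, j) :: rest) m nq ns = drainA rest st1.1 st1.2.1 st1.2.2 := rfl
    have hP1pos : ∀ c : Int × Int, (negAt m c ∧ c ∈ nbrs (i, j)) → 0 < getC st1.1 c.1 c.2 := by
      intro c hc
      have := (F1.2 c).1 hc
      have hneg : getC m c.1 c.2 < 0 := hc.1
      omega
    have hkeep : ∀ c : Int × Int, ¬(negAt m c ∧ c ∈ nbrs (i, j)) →
        getC st1.1 c.1 c.2 = getC m c.1 c.2 := fun c hc => (F1.2 c).2 hc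
    have hq1 : ∀ c ∈ rest, posAt st1.1 c := by
      intro c hc
      have hp := hqrest c hc
      have : ¬(negAt m c ∧ c ∈ nbrs (i, j)) := by
        rintro ⟨hn, _⟩; simp only [posAt] at hp; simp only [negAt] at hn; omega
      simp only [posAt] at hp ⊢
      rw [hkeep c this]; exact hp
    obtain ⟨F2, Q2, N2, I2⟩ := ih st1.1 st1.2.1 st1.2.2 hq1 I1
    have hiff : ∀ c : Int × Int,
        ((negAt m c ∧ c ∈ nbrs (i, j)) ∨ (negAt st1.1 c ∧ ∃ p ∈ rest, c ∈ nbrs p))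
          ↔ (negAt m c ∧ ∃ p ∈ (i, j) :: rest, c ∈ nbrs p) := by
      intro c
      constructor
      · rintro (⟨hn, hc⟩ | ⟨hn, p, hp, hc⟩)
        · exact ⟨hn, (i, j), List.mem_cons_self .., hc⟩
        · have hnot : ¬(negAt m c ∧ c ∈ nbrs (i, j)) := by
            intro hP1
            have := hP1pos c hP1
            simp only [negAt] at hn; omega
          have : getC m c.1 c.2 < 0 := by
            simp only [negAt] at hn; rwa [hkeep c hnot] at hn
          exact ⟨this, p, List.mem_cons_of_mem _ hp, hc⟩
      · rintro ⟨hn, p, hp, hc⟩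
        rcases List.mem_cons.mp hp with rfl | hp'
        · exact Or.inl ⟨hn, hc⟩
        · by_cases hP1 : negAt m c ∧ c ∈ nbrs (i, j)
          · exact Or.inl hP1
          · refine Or.inr ⟨?_, p, hp', hc⟩
            simp only [negAt] at hn ⊢
            rwa [hkeep c hP1]
    have hdisj : ∀ c : Int × Int, ¬((negAt m c ∧ c ∈ nbrs (i, j))
        ∧ (negAt st1.1 c ∧ ∃ p ∈ rest, c ∈ nbrs p)) := by
      rintro c ⟨hP1, hn, _⟩
      have := hP1pos c hP1
      simp only [negAt] at hn; omega
    rw [hstep]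
    refine ⟨Flips_congr (Flips_trans F1 F2 hdisj) hiff, ?_, ?_, I2⟩
    · intro c
      rw [Q2 c, Q1 c]
      rw [or_assoc, hiff c]
    · intro c
      rw [N2 c, N1 c]
      constructor
      · rintro ⟨⟨hcns, h1⟩, h2⟩
        refine ⟨hcns, ?_⟩
        rw [← hiff c]
        rintro (hP | hP)
        · exact h1 hP
        · exact h2 hP
      · rintro ⟨hcns, h⟩
        rw [← hiff c] at h
        exact ⟨⟨hcns, fun hP => h (Or.inl hP)⟩, fun hP => h (Or.inr hP)⟩

theorem D_iff_S (m : List (List Int)) (q : List (Int × Int))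
    (hq : ∀ c ∈ q, posAt m c) (hf : Front m q) :
    ∀ c, (negAt m c ∧ ∃ p ∈ q, c ∈ nbrs p) ↔ Sset m c := by
  intro c
  constructor
  · rintro ⟨hn, p, hp, hc⟩
    exact ⟨hn, p, (adj_symm p c).mp hc, hq p hp⟩
  · rintro ⟨hn, n, hnn, hpn⟩
    exact ⟨hn, n, hf n hpn ⟨c, (adj_symm n c).mpr hnn, hn⟩, (adj_symm n c).mpr hnn⟩

theorem cellPos_iff (m : List (List Int)) (p : Int × Int) : cellPos m p = true ↔ posAt m p := by
  simp only [cellPos, posAt, Bool.and_eq_true, decide_eq_true_eq]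
  constructor
  · rintro ⟨⟨⟨⟨h1, h2⟩, h3⟩, h4⟩, h5⟩
    rw [PySem.List.pyGet?_of_nonneg _ h1] at h5
    rw [PySem.List.pyGet?_of_nonneg _ h3] at h5
    simpa [getC, h1, h3] using h5
  · intro h
    obtain ⟨b0, b1, b2, b3⟩ := getC_neg_bounds m p.1 p.2 (by omega)
    rw [PySem.List.pyGet?_of_nonneg _ b0, PySem.List.pyGet?_of_nonneg _ b2]
    refine ⟨⟨⟨⟨b0, by omega⟩, b2⟩, by omega⟩, ?_⟩
    simpa [getC, b0, b2] using h

theorem hasPosNbr_iff (m : List (List Int)) (i j : Int) :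
    hasPosNbr m i j = true ↔ ∃ n ∈ nbrs (i, j), posAt m n := by
  have hl : nbrs (i, j) = [(i + 1, j), (i - 1, j), (i, j - 1), (i, j + 1)] := rfl
  simp only [hasPosNbr, List.any_eq_true, hl]
  constructor
  · rintro ⟨p, hp, hc⟩; exact ⟨p, hp, (cellPos_iff m p).mp hc⟩
  · rintro ⟨p, hp, hc⟩; exact ⟨p, hp, (cellPos_iff m p).mpr hc⟩

theorem flipsRow_mem (m : List (List Int)) (i : Int) (sub : List Int) : ∀ (j : Int) (c : Int × Int),
    c ∈ flipsRow m i j sub ↔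
      ∃ k : Nat, ∃ _ : k < sub.length, c = (i, j + (k : Int)) ∧ sub[k]! < 0 ∧
        hasPosNbr m i (j + (k : Int)) = true := by
  induction sub with
  | nil => intro j c; simp [flipsRow]
  | cons v rest ih =>
    intro j c
    simp only [flipsRow, List.mem_append, List.mem_ite_nil_right, List.mem_singleton,
      Bool.and_eq_true, decide_eq_true_eq]
    constructor
    · rintro (⟨⟨hv, hp⟩, rfl⟩ | h)
      · refine ⟨0, by simp, by simp, by simpa using hv, by simpa using hp⟩
      · obtain ⟨k, hk, hc, hneg, hpos⟩ := (ih (j + 1) c).mp h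
        have hcast : j + 1 + (k : Int) = j + ((k + 1 : Nat) : Int) := by push_cast; ring
        refine ⟨k + 1, by simpa using hk, ?_, ?_, ?_⟩
        · rw [hc, hcast]
        · simpa using hneg
        · rwa [hcast] at hpos
    · rintro ⟨k, hk, rfl, hneg, hpos⟩
      match k with
      | 0 =>
        left
        refine ⟨⟨by simpa using hneg, by simpa using hpos⟩, by simp⟩
      | Nat.succ k =>
        right
        apply (ih (j + 1) _).mpr
        have hcast : j + 1 + (k : Int) = j + ((k + 1 : Nat) : Int) := by push_cast; ring
        refine ⟨k, by simpa using hk, by rw [hcast], by simpa using hneg,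
          by rw [hcast]; simpa using hpos⟩

theorem flipsRow_snd (m : List (List Int)) (i : Int) (sub : List Int) (j : Int) (c : Int × Int)
    (hc : c ∈ flipsRow m i j sub) : c.1 = i ∧ j ≤ c.2 := by
  obtain ⟨k, hk, rfl, -, -⟩ := (flipsRow_mem m i sub j c).mp hc
  refine ⟨by simp, by simp⟩

theorem flipsRow_nodup (m : List (List Int)) (i : Int) (sub : List Int) : ∀ (j : Int),
    (flipsRow m i j sub).Nodup := by
  induction sub with
  | nil => intro j; simp [flipsRow]
  | cons v rest ih =>
    intro j
    simp only [flipsRow]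
    rw [List.nodup_append]
    refine ⟨?_, ih (j + 1), ?_⟩
    · split <;> simp
    · intro a ha b hb
      have hb' := flipsRow_snd m i rest (j + 1) b hb
      have ha' : a = (i, j) := by
        rcases Decidable.em ((decide (v < 0) && hasPosNbr m i j) = true) with hcond | hcond
        · rw [if_pos hcond] at ha; simpa using ha
        · rw [if_neg hcond] at ha; simp at ha
      rintro rfl
      rw [ha'] at hb'
      simp at hb'

theorem flipsAll_mem (m : List (List Int)) (rows : List (List Int)) : ∀ (i : Int) (c : Int × Int),
    c ∈ flipsAll m i rows ↔
      ∃ a : Nat, ∃ _ : a < rows.length, c ∈ flipsRow m (i + (a : Int)) 0 rows[a]! := by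
  induction rows with
  | nil => intro i c; simp [flipsAll]
  | cons row rest ih =>
    intro i c
    simp only [flipsAll, List.mem_append]
    constructor
    · rintro (h | h)
      · exact ⟨0, by simp, by simpa using h⟩
      · obtain ⟨a, ha, hc⟩ := (ih (i + 1) c).mp h
        have hcast : i + 1 + (a : Int) = i + ((a + 1 : Nat) : Int) := by push_cast; ring
        refine ⟨a + 1, by simpa using ha, ?_⟩
        rw [← hcast]
        simpa using hc
    · rintro ⟨a, ha, hc⟩
      match a with
      | 0 => left; simpa using hc
      | Nat.succ a =>
        right
        apply (ih (i + 1) c).mpr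
        have hcast : i + 1 + (a : Int) = i + ((a + 1 : Nat) : Int) := by push_cast; ring
        refine ⟨a, by simpa using ha, ?_⟩
        rw [hcast]
        simpa using hc

theorem flipsAll_fst (m : List (List Int)) (rows : List (List Int)) (i : Int) (c : Int × Int)
    (hc : c ∈ flipsAll m i rows) : i ≤ c.1 := by
  obtain ⟨a, ha, hc'⟩ := (flipsAll_mem m rows i c).mp hc
  have := (flipsRow_snd m (i + (a : Int)) _ 0 c hc').1
  omega

theorem flipsAll_nodup (m : List (List Int)) (rows : List (List Int)) : ∀ (i : Int),
    (flipsAll m i rows).Nodup := by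
  induction rows with
  | nil => intro i; simp [flipsAll]
  | cons row rest ih =>
    intro i
    simp only [flipsAll]
    rw [List.nodup_append]
    refine ⟨flipsRow_nodup m i row 0, ih (i + 1), ?_⟩
    intro a ha b hb
    have ha' := (flipsRow_snd m i row 0 a ha).1
    have hb' := flipsAll_fst m rest (i + 1) b hb
    rintro rfl
    omega

theorem sweepFlips_mem (m : List (List Int)) (c : Int × Int) :
    c ∈ sweepFlips m ↔ Sset m c := by
  rw [sweepFlips, flipsAll_mem]
  simp only [zero_add]
  constructor
  · rintro ⟨a, ha, hc⟩
    rw [flipsRow_mem] at hc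
    obtain ⟨k, hk, rfl, hneg, hpos⟩ := hc
    have hma : (m[a]! : List Int) = m[a] := by
      simp [List.getElem!_eq_getElem?_getD, List.getElem?_eq_getElem ha]
    rw [hma] at hk hneg
    have hval : getC m (a : Int) (k : Int) = m[a][k] := by
      simp [getC, List.getElem?_eq_getElem ha, List.getElem?_eq_getElem hk]
    have hneg' : m[a][k] < 0 := by
      simpa [List.getElem!_eq_getElem?_getD, List.getElem?_eq_getElem hk] using hneg
    have hS2 := (hasPosNbr_iff m (a : Int) (k : Int)).mp (by simpa using hpos)
    refine ⟨?_, ?_⟩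
    · simp only [negAt, zero_add]
      simpa [hval] using hneg'
    · simpa using hS2
  · rintro ⟨hneg, hpos⟩
    have hneg' : getC m c.1 c.2 < 0 := hneg
    obtain ⟨b0, b1, b2, b3⟩ := getC_neg_bounds m c.1 c.2 (by omega)
    have hrowa : m[c.1.toNat]?.getD [] = m[c.1.toNat] := by
      rw [List.getElem?_eq_getElem b1]; rfl
    rw [hrowa] at b3
    have hma : (m[c.1.toNat]! : List Int) = m[c.1.toNat] := by
      simp [List.getElem!_eq_getElem?_getD, List.getElem?_eq_getElem b1]
    refine ⟨c.1.toNat, b1, ?_⟩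
    rw [flipsRow_mem]
    refine ⟨c.2.toNat, by rw [hma]; exact b3, ?_, ?_, ?_⟩
    · obtain ⟨x, y⟩ := c
      simp only at b0 b2 ⊢
      rw [Prod.mk.injEq]
      constructor <;> [skip; skip] <;> omega
    · rw [hma, List.getElem!_eq_getElem?_getD, List.getElem?_eq_getElem b3, Option.getD_some]
      have he : getC m c.1 c.2 = m[c.1.toNat][c.2.toNat] := by
        simp [getC, b0, b2, List.getElem?_eq_getElem b1, List.getElem?_eq_getElem b3]
      rwa [he] at hneg'
    · rw [hasPosNbr_iff]
      have h1 : ((c.1.toNat : Nat) : Int) = c.1 := Int.toNat_of_nonneg b0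
      have h2 : (0 : Int) + ((c.2.toNat : Nat) : Int) = c.2 := by omega
      rw [h1, h2]
      simpa using hpos

theorem applyFlips_char (fl : List (Int × Int)) : ∀ (m : List (List Int)),
    fl.Nodup → (∀ c ∈ fl, negAt m c) →
    Flips m (fun c => c ∈ fl) (fl.foldl (fun acc p => flipCell acc p.1 p.2) m) := by
  induction fl with
  | nil =>
    intro m _ _
    exact Flips_id m _ (by simp)
  | cons c0 fl ih =>
    intro m hnd hneg
    have hl0 : c0 ∉ fl := (List.nodup_cons.mp hnd).1
    have hlnd : fl.Nodup := (List.nodup_cons.mp hnd).2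
    have hn0 : getC m c0.1 c0.2 < 0 := hneg c0 (List.mem_cons_self ..)
    obtain ⟨b0, b1, b2, b3⟩ := getC_neg_bounds m c0.1 c0.2 (by omega)
    have hfc : flipCell m c0.1 c0.2
        = m.set c0.1.toNat ((m[c0.1.toNat]?.getD []).set c0.2.toNat (-(getC m c0.1 c0.2))) := by
      simp only [flipCell]
      rw [PySem.List.pyGet?_of_nonneg _ b0, PySem.List.pyGet?_of_nonneg _ b2]
      have : ((m[c0.1.toNat]?.getD [])[c0.2.toNat]?).getD 0 = getC m c0.1 c0.2 := by
        simp [getC, b0, b2]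
      rw [this]
    have hstep : (c0 :: fl).foldl (fun acc p => flipCell acc p.1 p.2) m
        = fl.foldl (fun acc p => flipCell acc p.1 p.2) (flipCell m c0.1 c0.2) := rfl
    set m1 := flipCell m c0.1 c0.2 with hm1
    have hg1 : ∀ a b : Int, getC m1 a b
        = if a = c0.1 ∧ b = c0.2 then -(getC m c0.1 c0.2) else getC m a b := by
      intro a b
      rw [hfc]
      exact set_getC m c0.1 c0.2 _ b0 b2 b1 b3 a b
    have hflip1 : Flips m (fun c => c = c0) m1 := by
      refine ⟨by rw [hfc]; exact set_shape m c0.1.toNat c0.2.toNat _ b1, fun c => ⟨?_, ?_⟩⟩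
      · rintro rfl
        rw [hg1, if_pos ⟨rfl, rfl⟩]
      · intro hne
        rw [hg1, if_neg]
        rintro ⟨e1, e2⟩
        exact hne (by obtain ⟨x, y⟩ := c; obtain ⟨x0, y0⟩ := c0; simp_all)
    have hneg1 : ∀ c ∈ fl, negAt m1 c := by
      intro c hc
      have hne : c ≠ c0 := by rintro rfl; exact hl0 hc
      have := hneg c (List.mem_cons_of_mem _ hc)
      simp only [negAt] at this ⊢
      rwa [(hflip1.2 c).2 hne]
    have hF2 := ih m1 hlnd hneg1
    rw [hstep]
    refine Flips_congr (Flips_trans hflip1 hF2 ?_) ?_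
    · rintro c ⟨rfl, hc⟩
      exact hl0 hc
    · intro c
      simp only [List.mem_cons]

theorem scanRowA_mem1 (i : Int) (sub : List Int) : ∀ (j : Int) (c : Int × Int),
    c ∈ (scanRowA i j sub).1 ↔
      ∃ k : Nat, ∃ _ : k < sub.length, c = (i, j + (k : Int)) ∧ 0 < sub[k]! := by
  induction sub with
  | nil => intro j c; simp [scanRowA]
  | cons v rest ih =>
    intro j c
    simp only [scanRowA]
    by_cases hv : v > 0
    · rw [if_pos hv]
      simp only [List.mem_cons]
      constructor
      · rintro (rfl | h)
        · exact ⟨0, by simp, by simp, by simpa using hv⟩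
        · obtain ⟨k, hk, hc, hp⟩ := (ih (j + 1) c).mp h
          have hcast : j + 1 + (k : Int) = j + ((k + 1 : Nat) : Int) := by push_cast; ring
          exact ⟨k + 1, by simpa using hk, by rw [hc, hcast], by simpa using hp⟩
      · rintro ⟨k, hk, rfl, hp⟩
        match k with
        | 0 => left; simp
        | Nat.succ k =>
          right
          apply (ih (j + 1) _).mpr
          have hcast : j + 1 + (k : Int) = j + ((k + 1 : Nat) : Int) := by push_cast; ring
          exact ⟨k, by simpa using hk, by rw [hcast], by simpa using hp⟩
    · rw [if_neg hv]
      constructor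
      · intro h
        obtain ⟨k, hk, hc, hp⟩ := (ih (j + 1) c).mp h
        have hcast : j + 1 + (k : Int) = j + ((k + 1 : Nat) : Int) := by push_cast; ring
        exact ⟨k + 1, by simpa using hk, by rw [hc, hcast], by simpa using hp⟩
      · rintro ⟨k, hk, rfl, hp⟩
        match k with
        | 0 => exact absurd (by simpa using hp) hv
        | Nat.succ k =>
          apply (ih (j + 1) _).mpr
          have hcast : j + 1 + (k : Int) = j + ((k + 1 : Nat) : Int) := by push_cast; ring
          exact ⟨k, by simpa using hk, by rw [hcast], by simpa using hp⟩

theorem scanRowA_mem2 (i : Int) (sub : List Int) : ∀ (j : Int) (c : Int × Int),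
    c ∈ (scanRowA i j sub).2 ↔
      ∃ k : Nat, ∃ _ : k < sub.length, c = (i, j + (k : Int)) ∧ sub[k]! < 0 := by
  induction sub with
  | nil => intro j c; simp [scanRowA]
  | cons v rest ih =>
    intro j c
    simp only [scanRowA]
    by_cases hv : v < 0
    · rw [if_pos hv]
      simp only [List.mem_cons]
      constructor
      · rintro (rfl | h)
        · exact ⟨0, by simp, by simp, by simpa using hv⟩
        · obtain ⟨k, hk, hc, hp⟩ := (ih (j + 1) c).mp h
          have hcast : j + 1 + (k : Int) = j + ((k + 1 : Nat) : Int) := by push_cast; ring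
          exact ⟨k + 1, by simpa using hk, by rw [hc, hcast], by simpa using hp⟩
      · rintro ⟨k, hk, rfl, hp⟩
        match k with
        | 0 => left; simp
        | Nat.succ k =>
          right
          apply (ih (j + 1) _).mpr
          have hcast : j + 1 + (k : Int) = j + ((k + 1 : Nat) : Int) := by push_cast; ring
          exact ⟨k, by simpa using hk, by rw [hcast], by simpa using hp⟩
    · rw [if_neg hv]
      constructor
      · intro h
        obtain ⟨k, hk, hc, hp⟩ := (ih (j + 1) c).mp h
        have hcast : j + 1 + (k : Int) = j + ((k + 1 : Nat) : Int) := by push_cast; ring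
        exact ⟨k + 1, by simpa using hk, by rw [hc, hcast], by simpa using hp⟩
      · rintro ⟨k, hk, rfl, hp⟩
        match k with
        | 0 => exact absurd (by simpa using hp) hv
        | Nat.succ k =>
          apply (ih (j + 1) _).mpr
          have hcast : j + 1 + (k : Int) = j + ((k + 1 : Nat) : Int) := by push_cast; ring
          exact ⟨k, by simpa using hk, by rw [hcast], by simpa using hp⟩

theorem scanRowA_snd2 (i : Int) (sub : List Int) (j : Int) (c : Int × Int)
    (hc : c ∈ (scanRowA i j sub).2) : c.1 = i ∧ j ≤ c.2 := by
  obtain ⟨k, hk, rfl, -⟩ := (scanRowA_mem2 i sub j c).mp hc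
  refine ⟨by simp, by simp⟩

theorem scanRowA_nodup2 (i : Int) (sub : List Int) : ∀ (j : Int), ((scanRowA i j sub).2).Nodup := by
  induction sub with
  | nil => intro j; simp [scanRowA]
  | cons v rest ih =>
    intro j
    simp only [scanRowA]
    by_cases hv : v < 0
    · rw [if_pos hv]
      refine List.nodup_cons.mpr ⟨?_, ih (j + 1)⟩
      intro hmem
      have := (scanRowA_snd2 i rest (j + 1) _ hmem).2
      simp at this
    · rw [if_neg hv]; exact ih (j + 1)

theorem scanA_mem1 (rows : List (List Int)) : ∀ (i : Int) (c : Int × Int),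
    c ∈ (scanA i rows).1 ↔
      ∃ a : Nat, ∃ _ : a < rows.length, c ∈ (scanRowA (i + (a : Int)) 0 rows[a]!).1 := by
  induction rows with
  | nil => intro i c; simp [scanA]
  | cons row rest ih =>
    intro i c
    simp only [scanA, List.mem_append]
    constructor
    · rintro (h | h)
      · exact ⟨0, by simp, by simpa using h⟩
      · obtain ⟨a, ha, hc⟩ := (ih (i + 1) c).mp h
        have hcast : i + 1 + (a : Int) = i + ((a + 1 : Nat) : Int) := by push_cast; ring
        refine ⟨a + 1, by simpa using ha, ?_⟩
        rw [← hcast]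
        simpa using hc
    · rintro ⟨a, ha, hc⟩
      match a with
      | 0 => left; simpa using hc
      | Nat.succ a =>
        right
        apply (ih (i + 1) c).mpr
        have hcast : i + 1 + (a : Int) = i + ((a + 1 : Nat) : Int) := by push_cast; ring
        refine ⟨a, by simpa using ha, ?_⟩
        rw [hcast]
        simpa using hc

theorem scanA_mem2 (rows : List (List Int)) : ∀ (i : Int) (c : Int × Int),
    c ∈ (scanA i rows).2 ↔
      ∃ a : Nat, ∃ _ : a < rows.length, c ∈ (scanRowA (i + (a : Int)) 0 rows[a]!).2 := by
  induction rows with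
  | nil => intro i c; simp [scanA]
  | cons row rest ih =>
    intro i c
    simp only [scanA, List.mem_append]
    constructor
    · rintro (h | h)
      · exact ⟨0, by simp, by simpa using h⟩
      · obtain ⟨a, ha, hc⟩ := (ih (i + 1) c).mp h
        have hcast : i + 1 + (a : Int) = i + ((a + 1 : Nat) : Int) := by push_cast; ring
        refine ⟨a + 1, by simpa using ha, ?_⟩
        rw [← hcast]
        simpa using hc
    · rintro ⟨a, ha, hc⟩
      match a with
      | 0 => left; simpa using hc
      | Nat.succ a =>
        right
        apply (ih (i + 1) c).mpr
        have hcast : i + 1 + (a : Int) = i + ((a + 1 : Nat) : Int) := by push_cast; ring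
        refine ⟨a, by simpa using ha, ?_⟩
        rw [hcast]
        simpa using hc

theorem scanA_fst2 (rows : List (List Int)) (i : Int) (c : Int × Int)
    (hc : c ∈ (scanA i rows).2) : i ≤ c.1 := by
  obtain ⟨a, ha, hc'⟩ := (scanA_mem2 rows i c).mp hc
  have := (scanRowA_snd2 (i + (a : Int)) _ 0 c hc').1
  omega

theorem scanA_nodup2 (rows : List (List Int)) : ∀ (i : Int), ((scanA i rows).2).Nodup := by
  induction rows with
  | nil => intro i; simp [scanA]
  | cons row rest ih =>
    intro i
    simp only [scanA]
    rw [List.nodup_append]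
    refine ⟨scanRowA_nodup2 i row 0, ih (i + 1), ?_⟩
    intro a ha b hb
    have ha' := (scanRowA_snd2 i row 0 a ha).1
    have hb' := scanA_fst2 rest (i + 1) b hb
    rintro rfl
    omega

theorem scan_pos_iff (m : List (List Int)) (c : Int × Int) :
    c ∈ (scanA 0 m).1 ↔ posAt m c := by
  rw [scanA_mem1]
  simp only [zero_add]
  constructor
  · rintro ⟨a, ha, hc⟩
    rw [scanRowA_mem1] at hc
    obtain ⟨k, hk, rfl, hp⟩ := hc
    have hma : (m[a]! : List Int) = m[a] := by
      simp [List.getElem!_eq_getElem?_getD, List.getElem?_eq_getElem ha]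
    rw [hma] at hk hp
    have hval : getC m (a : Int) (k : Int) = m[a][k] := by
      simp [getC, List.getElem?_eq_getElem ha, List.getElem?_eq_getElem hk]
    have hp' : 0 < m[a][k] := by
      simpa [List.getElem!_eq_getElem?_getD, List.getElem?_eq_getElem hk] using hp
    simp only [posAt, zero_add]
    simpa [hval] using hp'
  · intro hp
    have hp' : 0 < getC m c.1 c.2 := hp
    obtain ⟨b0, b1, b2, b3⟩ := getC_neg_bounds m c.1 c.2 (by omega)
    have hrowa : m[c.1.toNat]?.getD [] = m[c.1.toNat] := by
      rw [List.getElem?_eq_getElem b1]; rfl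
    rw [hrowa] at b3
    have hma : (m[c.1.toNat]! : List Int) = m[c.1.toNat] := by
      simp [List.getElem!_eq_getElem?_getD, List.getElem?_eq_getElem b1]
    refine ⟨c.1.toNat, b1, ?_⟩
    rw [scanRowA_mem1]
    refine ⟨c.2.toNat, by rw [hma]; exact b3, ?_, ?_⟩
    · obtain ⟨x, y⟩ := c
      simp only at b0 b2 ⊢
      rw [Prod.mk.injEq]
      constructor <;> [skip; skip] <;> omega
    · rw [hma, List.getElem!_eq_getElem?_getD, List.getElem?_eq_getElem b3, Option.getD_some]
      have he : getC m c.1 c.2 = m[c.1.toNat][c.2.toNat] := by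
        simp [getC, b0, b2, List.getElem?_eq_getElem b1, List.getElem?_eq_getElem b3]
      rwa [he] at hp'

theorem scan_neg_iff (m : List (List Int)) (c : Int × Int) :
    c ∈ (scanA 0 m).2 ↔ negAt m c := by
  rw [scanA_mem2]
  simp only [zero_add]
  constructor
  · rintro ⟨a, ha, hc⟩
    rw [scanRowA_mem2] at hc
    obtain ⟨k, hk, rfl, hp⟩ := hc
    have hma : (m[a]! : List Int) = m[a] := by
      simp [List.getElem!_eq_getElem?_getD, List.getElem?_eq_getElem ha]
    rw [hma] at hk hp
    have hval : getC m (a : Int) (k : Int) = m[a][k] := by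
      simp [getC, List.getElem?_eq_getElem ha, List.getElem?_eq_getElem hk]
    have hp' : m[a][k] < 0 := by
      simpa [List.getElem!_eq_getElem?_getD, List.getElem?_eq_getElem hk] using hp
    simp only [negAt, zero_add]
    simpa [hval] using hp'
  · intro hp
    have hp' : getC m c.1 c.2 < 0 := hp
    obtain ⟨b0, b1, b2, b3⟩ := getC_neg_bounds m c.1 c.2 (by omega)
    have hrowa : m[c.1.toNat]?.getD [] = m[c.1.toNat] := by
      rw [List.getElem?_eq_getElem b1]; rfl
    rw [hrowa] at b3
    have hma : (m[c.1.toNat]! : List Int) = m[c.1.toNat] := by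
      simp [List.getElem!_eq_getElem?_getD, List.getElem?_eq_getElem b1]
    refine ⟨c.1.toNat, b1, ?_⟩
    rw [scanRowA_mem2]
    refine ⟨c.2.toNat, by rw [hma]; exact b3, ?_, ?_⟩
    · obtain ⟨x, y⟩ := c
      simp only at b0 b2 ⊢
      rw [Prod.mk.injEq]
      constructor <;> [skip; skip] <;> omega
    · rw [hma, List.getElem!_eq_getElem?_getD, List.getElem?_eq_getElem b3, Option.getD_some]
      have he : getC m c.1 c.2 = m[c.1.toNat][c.2.toNat] := by
        simp [getC, b0, b2, List.getElem?_eq_getElem b1, List.getElem?_eq_getElem b3]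
      rwa [he] at hp'

theorem scanRowA_len (i : Int) : ∀ (j : Int) (row : List Int),
    (scanRowA i j row).2.length ≤ row.length := by
  intro j row
  induction row generalizing j with
  | nil => simp [scanRowA]
  | cons v rest ih =>
    simp only [scanRowA]
    split_ifs <;> simp only [List.length_cons] <;>
      first
        | exact Nat.succ_le_succ (ih (j + 1))
        | exact Nat.le_succ_of_le (ih (j + 1))

theorem scanA_len (rows : List (List Int)) : ∀ (i : Int),
    (scanA i rows).2.length ≤ rows.flatten.length := by
  induction rows with
  | nil => intro i; simp [scanA]
  | cons row rest ih =>
    intro i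
    simp only [scanA, List.flatten_cons, List.length_append]
    have h1 := scanRowA_len i 0 row
    have h2 := ih (i + 1)
    omega


theorem anyNeg_iff (m : List (List Int)) : anyNeg m = true ↔ ∃ c, negAt m c := by
  simp only [anyNeg, List.any_eq_true, decide_eq_true_eq]
  constructor
  · rintro ⟨row, hrow, v, hv, hneg⟩
    obtain ⟨a, ha, rfl⟩ := List.mem_iff_getElem.mp hrow
    obtain ⟨b, hb, rfl⟩ := List.mem_iff_getElem.mp hv
    refine ⟨((a : Int), (b : Int)), ?_⟩
    have hrowa : m[a]?.getD [] = m[a] := by rw [List.getElem?_eq_getElem ha]; rfl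
    simp only [negAt]
    rw [getC_of_lt m a b ha (by rw [hrowa]; exact hb), hrowa,
      List.getElem?_eq_getElem hb]
    exact hneg
  · rintro ⟨c, hc⟩
    simp only [negAt] at hc
    obtain ⟨b0, b1, b2, b3⟩ := getC_neg_bounds m c.1 c.2 (by omega)
    have hrowa : m[c.1.toNat]?.getD [] = m[c.1.toNat] := by
      rw [List.getElem?_eq_getElem b1]; rfl
    rw [hrowa] at b3
    refine ⟨m[c.1.toNat], List.getElem_mem _, m[c.1.toNat][c.2.toNat], List.getElem_mem _, ?_⟩
    simp only [getC, if_pos (⟨b0, b2⟩ : 0 ≤ c.1 ∧ 0 ≤ c.2), hrowa,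
      List.getElem?_eq_getElem b3, Option.getD_some] at hc
    exact hc

theorem front_next (m m' : List (List Int)) (nq : List (Int × Int))
    (hF : Flips m (Sset m) m') (hmem : ∀ c, c ∈ nq ↔ Sset m c) : Front m' nq := by
  intro p hpp hex
  obtain ⟨d, hd, hnd⟩ := hex
  have hdS : ¬ Sset m d := by
    intro hS
    have h1 := (hF.2 d).1 hS
    have hneg : getC m d.1 d.2 < 0 := hS.1
    simp only [negAt] at hnd
    omega
  have hdm : negAt m d := by
    simp only [negAt] at hnd ⊢
    rwa [(hF.2 d).2 hdS] at hnd
  by_cases hpS : Sset m p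
  · exact (hmem p).mpr hpS
  · exfalso
    have hpm : posAt m p := by
      simp only [posAt] at hpp ⊢
      rwa [(hF.2 p).2 hpS] at hpp
    exact hdS ⟨hdm, p, (adj_symm p d).mp hd, hpm⟩

theorem loop_sim : ∀ (fuel : Nat) (q : List (Int × Int)) (m : List (List Int))
    (ns : List (Int × Int)) (c : Int) (turn : Bool),
    (∀ d ∈ q, posAt m d) → Front m q → InvAB m [] ns → ns.length ≤ fuel →
    loopA (fuel + 1) (if turn then q else []) (if turn then [] else q) turn m ns c
      = loopB (fuel + 2) m c := by
  intro fuel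
  induction fuel using Nat.strong_induction_on with
  | _ fuel ih =>
    intro q m ns c turn hq hf hInv hfuel
    obtain ⟨dF, dQ, dN, dI⟩ := drain_char q m [] ns hq hInv
    have hDS := D_iff_S m q hq hf
    have hQiff : ∀ d, d ∈ (drainA q m [] ns).2.1 ↔ Sset m d := by
      intro d
      rw [dQ d]
      simp only [List.not_mem_nil, false_or]
      exact hDS d
    have hA : loopA (fuel + 1) (if turn then q else []) (if turn then [] else q) turn m ns c
        = if (drainA q m [] ns).2.1 = []
          then (if (drainA q m [] ns).2.2.length = 0 then c + 1 - 1 else -1)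
          else loopA fuel (if !turn then (drainA q m [] ns).2.1 else [])
            (if !turn then [] else (drainA q m [] ns).2.1) (!turn)
            (drainA q m [] ns).1 (drainA q m [] ns).2.2 (c + 1) := by
      cases turn <;> simp [loopA]
    have hB : loopB (fuel + 2) m c
        = if sweepFlips m = [] then (if anyNeg m then -1 else c)
          else loopB (fuel + 1)
            ((sweepFlips m).foldl (fun acc p => flipCell acc p.1 p.2) m) (c + 1) := by
      show loopB ((fuel + 1) + 1) m c = _
      simp only [loopB]
    have hqe : (drainA q m [] ns).2.1 = [] ↔ sweepFlips m = [] := by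
      rw [List.eq_nil_iff_forall_not_mem, List.eq_nil_iff_forall_not_mem]
      constructor
      · intro h d hd
        exact h d ((hQiff d).mpr ((sweepFlips_mem m d).mp hd))
      · intro h d hd
        exact h d ((sweepFlips_mem m d).mpr ((hQiff d).mp hd))
    rw [hA, hB]
    by_cases he : (drainA q m [] ns).2.1 = []
    · rw [if_pos he, if_pos (hqe.mp he)]
      have hSempty : ∀ d, ¬ Sset m d := by
        intro d hS
        have := (hQiff d).mpr hS
        rw [he] at this
        exact List.not_mem_nil this
      have h1 : (drainA q m [] ns).2.2.length = 0 ↔ ∀ d, ¬ negAt m d := by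
        rw [List.length_eq_zero_iff, List.eq_nil_iff_forall_not_mem]
        constructor
        · intro h d hneg
          exact h d ((dN d).mpr ⟨hInv.2.2.1 d hneg, fun hD => hSempty d ((hDS d).mp hD)⟩)
        · intro h d hd
          exact h d (hInv.2.2.2.1 d ((dN d).mp hd).1)
      by_cases hall : ∀ d, ¬ negAt m d
      · rw [if_pos (h1.mpr hall), if_neg]
        · omega
        · intro hany
          obtain ⟨d, hd⟩ := (anyNeg_iff m).mp hany
          exact hall d hd
      · rw [if_neg (fun hc => hall (h1.mp hc)), if_pos]
        rw [anyNeg_iff]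
        by_contra hno
        apply hall
        intro d hd
        exact hno ⟨d, hd⟩
    · rw [if_neg he, if_neg (fun hc => he (hqe.mpr hc))]
      have hFA : Flips m (Sset m) (drainA q m [] ns).1 := Flips_congr dF hDS
      have hsnodup : (sweepFlips m).Nodup := flipsAll_nodup m m 0
      have hFB : Flips m (Sset m)
          ((sweepFlips m).foldl (fun acc p => flipCell acc p.1 p.2) m) :=
        Flips_congr
          (applyFlips_char (sweepFlips m) m hsnodup
            (fun d hd => ((sweepFlips_mem m d).mp hd).1))
          (fun d => sweepFlips_mem m d)
      have hmeq : (drainA q m [] ns).1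
          = (sweepFlips m).foldl (fun acc p => flipCell acc p.1 p.2) m :=
        flips_unique hFA hFB
      obtain ⟨c0, hc0⟩ := List.exists_mem_of_ne_nil _ he
      have hS0 : Sset m c0 := (hQiff c0).mp hc0
      have hc0ns : c0 ∈ ns := hInv.2.2.1 c0 hS0.1
      have hnsnd : ns.Nodup := hInv.2.2.2.2
      have hsub : (drainA q m [] ns).2.2 ⊆ ns.erase c0 := by
        intro d hd
        obtain ⟨hdns, hdD⟩ := (dN d).mp hd
        have hne : d ≠ c0 := by
          rintro rfl
          exact hdD ((hDS d).mpr hS0)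
        exact (List.Nodup.mem_erase_iff hnsnd).mpr ⟨hne, hdns⟩
      have hlt : (drainA q m [] ns).2.2.length < ns.length := by
        have h2 := (List.Subperm.length_le (List.Nodup.subperm dI.2.2.2.2 hsub))
        have h3 := List.length_erase_of_mem hc0ns
        have h4 : 0 < ns.length := List.length_pos_of_mem hc0ns
        omega
      obtain ⟨f, rfl⟩ : ∃ f, fuel = f + 1 := ⟨fuel - 1, by omega⟩
      have hq' : ∀ d ∈ (drainA q m [] ns).2.1, posAt (drainA q m [] ns).1 d := dI.1
      have hf' : Front (drainA q m [] ns).1 (drainA q m [] ns).2.1 :=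
        front_next m _ _ hFA hQiff
      have hInv' : InvAB (drainA q m [] ns).1 [] (drainA q m [] ns).2.2 :=
        ⟨fun d hd => absurd hd (List.not_mem_nil), List.nodup_nil,
          dI.2.2.1, dI.2.2.2.1, dI.2.2.2.2⟩
      have hrec := ih f (by omega) (drainA q m [] ns).2.1 (drainA q m [] ns).1
        (drainA q m [] ns).2.2 (c + 1) (!turn) hq' hf' hInv' (by omega)
      rw [← hmeq]
      exact hrec

-- ===== VERDICT (by name: the statement is the Claim_ definition above) =====
theorem minimumPassesOfMatrix_spec : Claim_equal_minimumPassesOfMatrix := by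
  intro matrix _
  unfold Spec_minimumPassesOfMatrix minimumPassesOfMatrix minimumPassesOfMatrix_alt
  have hq : ∀ d ∈ (scanA 0 matrix).1, posAt matrix d := by
    intro d hd; exact (scan_pos_iff matrix d).mp hd
  have hf : Front matrix (scanA 0 matrix).1 := by
    intro p hp _; exact (scan_pos_iff matrix p).mpr hp
  have hInv : InvAB matrix [] (scanA 0 matrix).2 := by
    refine ⟨by simp, by simp, ?_, ?_, scanA_nodup2 matrix 0⟩
    · intro c hc; exact (scan_neg_iff matrix c).mpr hc
    · intro c hc; exact (scan_neg_iff matrix c).mp hc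
  have := loop_sim matrix.flatten.length (scanA 0 matrix).1 matrix (scanA 0 matrix).2 0 true
    hq hf hInv (scanA_len matrix 0)
  simpa using this
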